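-- pv_equiv track=rewrite | github.com/chunhyungseok/2022-AI- | code/Data_processing.py | get_dic
-- ===== SOURCE A (Python) =====
-- def get_dic(data):
--     vocab = {}
--     for name in data:
--         if name not in vocab:
--             vocab[name]=0
--         vocab[name] += 1
--     vocab_sorted = sorted(vocab.items(), key=lambda x:x[1], reverse=True)
--     token_dic = {}
--     i = 1
--     # train에서 보지 않은 disease들 Unknown 토큰 처리
--     # train과정에서 없는 disease들은 0으로 처리하였음
--     token_dic['Unknown'] = 0
--     for (name, freq) in vocab_sorted:
--         token_dic[name] = i
--         i += 1
--     return token_dic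
-- ===== SOURCE B (Python) =====
-- def get_dic(data):
--     counts = {}
--     for name in data:
--         counts[name] = counts.get(name, 0) + 1
--     buckets = {}
--     for name, c in counts.items():
--         buckets.setdefault(c, []).append(name)
--     token_dic = {}
--     token_dic['Unknown'] = 0
--     i = 1
--     if counts:
--         for f in range(max(buckets), 0, -1):
--             for name in buckets.get(f, []):
--                 token_dic[name] = i
--                 i += 1
--     return token_dic
-- ===== Notes on version B (the rewrite author's own statement) =====
-- stated objective: alternative
-- what changed: The comparison sort of (token, frequency) pairs is replaced by a bucket pass: names are grouped into a dict keyed by frequency (first-seen order preserved) and IDs are assigned by walking the frequencies from the maximum down to 1.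
import Mathlib
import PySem

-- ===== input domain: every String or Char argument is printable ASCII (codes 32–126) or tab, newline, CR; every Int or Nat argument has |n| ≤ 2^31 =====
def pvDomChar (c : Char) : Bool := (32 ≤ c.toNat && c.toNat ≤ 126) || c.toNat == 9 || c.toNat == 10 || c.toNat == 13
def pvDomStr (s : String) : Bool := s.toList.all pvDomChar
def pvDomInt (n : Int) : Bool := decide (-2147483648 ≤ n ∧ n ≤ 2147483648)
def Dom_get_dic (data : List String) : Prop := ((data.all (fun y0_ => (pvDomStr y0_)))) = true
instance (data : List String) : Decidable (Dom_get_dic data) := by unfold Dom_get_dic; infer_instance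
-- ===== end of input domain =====

-- B replaces A's comparison sort of the (token, frequency) pairs by a bucket pass
-- (group token names by frequency, then emit buckets from the maximal frequency
-- downwards); objective: alternative decomposition of the ranking step.

-- ===== PORT A =====
def get_dic (data : List String) : List (String × Int) :=
  let vocab : PySem.Dict String Int :=
    data.foldl (fun vocab name =>
      let vocab := if vocab.contains name then vocab else vocab.insert name 0
      vocab.insert name (vocab.getD name 0 + 1)) PySem.Dict.empty
  let vocab_sorted := PySem.List.sorted vocab.items (fun x => x.2) true
  let token_dic : PySem.Dict String Int := PySem.Dict.empty.insert "Unknown" 0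
  let res := vocab_sorted.foldl
    (fun (st : PySem.Dict String Int × Int) p => (st.1.insert p.1 st.2, st.2 + 1))
    (token_dic, 1)
  res.1.items

-- ===== PORT B =====
def get_dic_alt (data : List String) : List (String × Int) :=
  let counts : PySem.Dict String Int :=
    data.foldl (fun d name => d.insert name (d.getD name 0 + 1)) PySem.Dict.empty
  let buckets : PySem.Dict Int (List String) :=
    counts.items.foldl (fun b p => b.modify p.2 [] (fun l => l ++ [p.1])) PySem.Dict.empty
  let token_dic : PySem.Dict String Int := PySem.Dict.empty.insert "Unknown" 0
  match PySem.List.max? buckets.keys (fun x => x) with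
  | none => token_dic.items               -- counts is empty: the 'if counts:' guard is false
  | some mx =>
    let res := (PySem.List.pyRange mx 0 (-1)).foldl
      (fun (st : PySem.Dict String Int × Int) f =>
        (buckets.getD f []).foldl
          (fun (st : PySem.Dict String Int × Int) name => (st.1.insert name st.2, st.2 + 1)) st)
      (token_dic, 1)
    res.1.items

-- ===== PRECONDITION & SPEC =====
def Spec_get_dic (data : List String) (out : List (String × Int)) : Prop := out = get_dic_alt data
instance (data : List String) (out : List (String × Int)) : Decidable (Spec_get_dic data out) := by unfold Spec_get_dic; infer_instance

-- ===== CLAIM (what is proved, stated in full; the proofs are below) =====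
def Claim_equal_get_dic : Prop := ∀ (data : List String), Dom_get_dic data → Spec_get_dic data (get_dic data)

-- ===== LEMMAS AND PROOFS =====

-- A's count loop (guarded insert of 0, then increment) builds exactly Counter(data).
lemma count_loop_eq_counter (data : List String) :
    data.foldl (fun vocab name =>
      let vocab := if vocab.contains name then vocab else vocab.insert name 0
      vocab.insert name (vocab.getD name 0 + 1)) PySem.Dict.empty
    = PySem.Dict.counter data := by
  rw [PySem.List.foldl_congr_mem _ _
        (fun d name => d.insert name (d.getD name 0 + 1)) _ ?_,
      PySem.Dict.foldl_insert_getD_add_one_eq_counter]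
  intro d name _
  by_cases h : d.contains name = true
  · simp [h]
  · simp only [Bool.not_eq_true] at h
    simp [h, PySem.Dict.getD_insert_self, PySem.Dict.insert_insert_self,
          PySem.Dict.getD_of_not_contains d _ h]

-- range(a, 0, -1) holds exactly the integers 1..a, strictly descending
lemma mem_pyRange_down (a x : Int) :
    x ∈ PySem.List.pyRange a 0 (-1) ↔ 0 < x ∧ x ≤ a := by
  by_cases h : (0 : Int) < a
  · simp only [PySem.List.pyRange]
    norm_num [h]
    constructor
    · rintro ⟨k, hk, rfl⟩; omega
    · intro hx; exact ⟨(a - x).toNat, by omega, by omega⟩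
  · simp only [PySem.List.pyRange]
    norm_num [h]
    omega

lemma pairwise_pyRange_down (a : Int) :
    (PySem.List.pyRange a 0 (-1)).Pairwise (fun p q => q < p) := by
  by_cases h : (0 : Int) < a
  · simp only [PySem.List.pyRange]
    norm_num [h, List.pairwise_map]
    exact List.pairwise_lt_range.imp (by intro i j hij; omega)
  · simp only [PySem.List.pyRange]
    norm_num [h]

-- B's bucket dict looks up to the (first-seen-ordered) names of a given frequency
lemma bucket_getD (L : List (String × Int)) (c : Int) :
    (L.foldl (fun b p => b.modify p.2 [] (fun l => l ++ [p.1])) PySem.Dict.empty).getD c []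
    = (L.filter (fun p => p.2 == c)).map (fun p => p.1) := by
  have h := PySem.Dict.getD_foldl_modify_append (L.map (fun p : String × Int => (p.2, p.1)))
    PySem.Dict.empty c
  simp only [List.foldl_map] at h
  rw [h]
  simp [List.filter_map, List.map_map, Function.comp_def]

lemma bucket_keys (L : List (String × Int)) :
    (L.foldl (fun b p => b.modify p.2 [] (fun l => l ++ [p.1])) PySem.Dict.empty).keys
    = PySem.Set.ofList (L.map (fun p => p.2)) := by
  rw [PySem.Dict.keys_foldl_modify_key L (fun p => p.2) [] (fun _ p => fun l => l ++ [p.1])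
      PySem.Dict.empty]
  rfl

-- A's ID-assignment loop over pairs only reads the name component
lemma foldl_fst (init : PySem.Dict String Int × Int) (M : List (String × Int)) :
    M.foldl (fun st p => (st.1.insert p.1 st.2, st.2 + 1)) init
    = (M.map (fun p => p.1)).foldl (fun st name => (st.1.insert name st.2, st.2 + 1)) init :=
  (List.foldl_map (f := fun p : String × Int => p.1)
    (g := fun (st : PySem.Dict String Int × Int) name => (st.1.insert name st.2, st.2 + 1))).symm

-- B's nested ID-assignment loop is the flat loop over the concatenated buckets
lemma foldl_buckets (vals : List Int) (h : Int → List String) (init : PySem.Dict String Int × Int) :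
    vals.foldl (fun st f => (h f).foldl (fun st name => (st.1.insert name st.2, st.2 + 1)) st) init
    = (vals.flatMap h).foldl (fun st name => (st.1.insert name st.2, st.2 + 1)) init := by
  rw [List.flatMap_def, List.foldl_flatten, List.foldl_map]

-- inserting x (stably, descending by key) into "all keys ≥ key x" ++ "all keys < key x"
lemma insertBy_middle {α : Type} (key : α → Int) (x : α) :
    ∀ (A B : List α), (∀ a ∈ A, ¬ key a < key x) → (∀ b ∈ B, key b < key x) →
      PySem.List.insertBy (fun a b => decide (key b < key a)) x (A ++ B) = A ++ x :: B := by
  intro A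
  induction A with
  | nil =>
    intro B _ hB
    cases B with
    | nil => simp [PySem.List.insertBy]
    | cons b B => simp [PySem.List.insertBy, hB b (List.mem_cons_self)]
  | cons a A ih =>
    intro B hA hB
    have hna : ¬ key a < key x := hA a List.mem_cons_self
    simp [PySem.List.insertBy, hna, ih B (fun a' h => hA a' (List.mem_cons_of_mem _ h)) hB]

-- buckets at values ≠ key x see no difference from appending x
lemma flatMap_filter_append {α : Type} (key : α → Int) (x : α) (L : List α) :
    ∀ (vs : List Int), (∀ v ∈ vs, v ≠ key x) →
      vs.flatMap (fun v => (L ++ [x]).filter (fun y => key y == v))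
      = vs.flatMap (fun v => L.filter (fun y => key y == v)) := by
  intro vs hvs
  apply List.flatMap_congr
  intro v hv
  have : (key x == v) = false := by simp [(hvs v hv).symm]
  simp [List.filter_append, this]

-- Python's stable reverse sort is the concatenation of the key buckets,
-- the bucket values enumerated strictly descending.
lemma sorted_rev_flatMap {α : Type} (key : α → Int) (vals : List Int)
    (hv : vals.Pairwise (fun a b => b < a)) :
    ∀ (L : List α), (∀ y ∈ L, key y ∈ vals) →
      PySem.List.sorted L key true = vals.flatMap (fun v => L.filter (fun y => key y == v)) := by
  intro L
  induction L using List.reverseRecOn with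
  | nil => simp [PySem.List.sorted]
  | append_singleton L x ih =>
    intro hmem
    have hL : ∀ y ∈ L, key y ∈ vals := fun y h => hmem y (List.mem_append_left _ h)
    have hx : key x ∈ vals := hmem x (List.mem_append_right _ List.mem_cons_self)
    rw [PySem.List.sorted_rev_eq_foldl_insertBy, List.foldl_append, List.foldl_cons,
        List.foldl_nil, ← PySem.List.sorted_rev_eq_foldl_insertBy, ih hL]
    obtain ⟨v1, v2, rfl⟩ := List.append_of_mem hx
    have hsplit := List.pairwise_append.mp hv
    have hv1 : ∀ v ∈ v1, key x < v := fun v h =>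
      hsplit.2.2 v h (key x) List.mem_cons_self
    have hv2 : ∀ v ∈ v2, v < key x :=
      fun v h => List.rel_of_pairwise_cons hsplit.2.1 h
    rw [List.flatMap_append, List.flatMap_cons, List.flatMap_append, List.flatMap_cons]
    rw [show v1.flatMap (fun v => L.filter (fun y => key y == v)) ++
          (L.filter (fun y => key y == key x) ++
            v2.flatMap (fun v => L.filter (fun y => key y == v)))
        = (v1.flatMap (fun v => L.filter (fun y => key y == v)) ++
            L.filter (fun y => key y == key x)) ++
            v2.flatMap (fun v => L.filter (fun y => key y == v)) by simp]
    rw [insertBy_middle key x _ _ ?_ ?_]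
    · rw [flatMap_filter_append key x L v1 (fun v h => ne_of_gt (hv1 v h)),
          flatMap_filter_append key x L v2 (fun v h => ne_of_lt (hv2 v h))]
      simp [List.filter_append]
    · intro a ha
      rcases List.mem_append.mp ha with h | h
      · obtain ⟨v, hvmem, hfil⟩ := List.mem_flatMap.mp h
        have : key a = v := by simpa using (List.mem_filter.mp hfil).2
        have := hv1 v hvmem
        omega
      · have : key a = key x := by simpa using (List.mem_filter.mp h).2
        omega
    · intro b hb
      obtain ⟨v, hvmem, hfil⟩ := List.mem_flatMap.mp hb
      have : key b = v := by simpa using (List.mem_filter.mp hfil).2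
      have := hv2 v hvmem
      omega

-- ===== VERDICT (by name: the statement is the Claim_ definition above) =====
theorem get_dic_spec : Claim_equal_get_dic := by
  intro data _
  unfold Spec_get_dic get_dic get_dic_alt
  dsimp only
  simp only [count_loop_eq_counter, PySem.Dict.foldl_insert_getD_add_one_eq_counter]
  set L := (PySem.Dict.counter data).items with hLdef
  have hpos : ∀ p ∈ L, 0 < p.2 := by
    rw [hLdef, PySem.Dict.items_counter]
    rintro p hp
    obtain ⟨k, hk, rfl⟩ := List.mem_map.mp hp
    simpa using List.count_pos_iff.mpr ((PySem.Set.mem_ofList data k).mp hk)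
  cases hmx : PySem.List.max?
      (L.foldl (fun b p => b.modify p.2 [] (fun l => l ++ [p.1])) PySem.Dict.empty).keys
      (fun x => x) with
  | none =>
    have hk0 := (PySem.List.max?_eq_none_iff _ _).mp hmx
    rw [bucket_keys] at hk0
    have hmap : L.map (fun p : String × Int => p.2) = [] := by
      rcases hml : L.map (fun p : String × Int => p.2) with _ | ⟨v, vs⟩
      · rfl
      · exfalso
        have hvmem : v ∈ PySem.Set.ofList (L.map (fun p : String × Int => p.2)) := by
          rw [PySem.Set.mem_ofList, hml]; exact List.mem_cons_self
        rw [hk0] at hvmem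
        exact List.not_mem_nil hvmem
    have hLnil : L = [] := List.map_eq_nil_iff.mp hmap
    rw [hLnil]
    rfl
  | some mx =>
    have hmx' := hmx
    rw [bucket_keys] at hmx'
    have hmxmax : ∀ f ∈ L.map (fun p : String × Int => p.2), f ≤ mx := by
      intro f hf
      simpa using PySem.List.max?_isMax hmx' f ((PySem.Set.mem_ofList _ f).mpr hf)
    have hmem : ∀ p ∈ L, (fun p : String × Int => p.2) p ∈ PySem.List.pyRange mx 0 (-1) := by
      intro p hp
      rw [mem_pyRange_down]
      exact ⟨hpos p hp, hmxmax p.2 (List.mem_map_of_mem hp)⟩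
    have hsorted := sorted_rev_flatMap (fun p : String × Int => p.2)
      (PySem.List.pyRange mx 0 (-1)) (pairwise_pyRange_down mx) L hmem
    dsimp only
    rw [hsorted, foldl_fst, foldl_buckets, List.map_flatMap]
    refine congrArg (fun M : List String =>
      ((M.foldl (fun (st : PySem.Dict String Int × Int) name => (st.1.insert name st.2, st.2 + 1))
        (PySem.Dict.empty.insert "Unknown" 0, (1 : Int))).1.items)) ?_
    apply List.flatMap_congr
    intro v _
    rw [bucket_getD]
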